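-- pv_equiv track=rewrite | github.com/mukadasadylbekova/CP_projects | assignment8/rectangle_cutting.py | min_moves_to_cut
-- ===== SOURCE A (Python) =====
-- def min_moves_to_cut(a, b):
--     dp = [[0] * (b + 1) for _ in range(a + 1)]
--
--     for i in range(1, a + 1):
--         for j in range(1, b + 1):
--             if i == j:
--                 dp[i][j] = 0
--             else:
--                 res = float('inf')
--                 for k in range(1, i):
--                     res = min(res, dp[k][j] + dp[i - k][j])
--                 for k in range(1, j):
--                     res = min(res, dp[i][k] + dp[i][j - k])
--                 dp[i][j] = res + 1
--     return dp[a][b]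
-- ===== SOURCE B (Python) =====
-- def min_moves_to_cut(a, b):
--     if a == 0 or b == 0:
--         return 0
--     memo = [[None] * (b + 1) for _ in range(a + 1)]
--
--     def solve(i, j):
--         if i == j:
--             return 0
--         if memo[i][j] is not None:
--             return memo[i][j]
--         best = None
--         for k in range(1, i):
--             c = solve(k, j) + solve(i - k, j)
--             if best is None or c < best:
--                 best = c
--         for k in range(1, j):
--             c = solve(i, k) + solve(i, j - k)
--             if best is None or c < best:
--                 best = c
--         memo[i][j] = best + 1
--         return best + 1
--
--     return solve(a, b)
-- ===== Notes on version B (the rewrite author's own statement) =====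
-- stated objective: alternative
-- what changed: Replaces A's bottom-up 2D DP table filled row by row with a top-down memoized recursion solve(i, j) over the same split recurrence, with an explicit zero short-circuit for a == 0 or b == 0.
import Mathlib
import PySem

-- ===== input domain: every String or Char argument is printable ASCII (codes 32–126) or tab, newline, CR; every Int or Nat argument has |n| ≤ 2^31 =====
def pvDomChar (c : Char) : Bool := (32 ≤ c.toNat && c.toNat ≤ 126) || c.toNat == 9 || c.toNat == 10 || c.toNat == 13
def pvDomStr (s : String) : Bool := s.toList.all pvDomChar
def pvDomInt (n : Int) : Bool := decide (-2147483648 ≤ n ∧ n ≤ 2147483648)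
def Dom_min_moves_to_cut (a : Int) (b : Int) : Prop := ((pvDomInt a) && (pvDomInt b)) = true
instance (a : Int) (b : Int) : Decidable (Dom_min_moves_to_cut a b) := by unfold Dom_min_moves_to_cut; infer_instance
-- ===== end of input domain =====

-- B replaces A's bottom-up O(a*b) table (with its cubic inner scans) by a top-down
-- memoized recursion on the same split recurrence (objective: alternative; same values).


-- ===== PORT A =====
-- min(res, v) where res is float('inf') or an int: none plays float('inf')
def pvMinO (r : Option Int) (v : Int) : Option Int :=
  some (match r with | none => v | some x => min x v)

-- dp[i][j] read; exact on the in-range indices the algorithm uses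
def pvGet2 (dp : List (List Int)) (i j : Int) : Int :=
  PySem.List.pyGetD (PySem.List.pyGetD dp i []) j 0

-- dp[i][j] = v write; exact on the in-range indices the algorithm uses
def pvSet2 (dp : List (List Int)) (i j v : Int) : List (List Int) :=
  PySem.List.pySetD dp i (PySem.List.pySetD (PySem.List.pyGetD dp i []) j v)

-- the body of A's inner double loop for one cell (i, j)
def pvCellStep (dp : List (List Int)) (i j : Int) : List (List Int) :=
  if i = j then pvSet2 dp i j 0
  else
    let res := (PySem.List.pyRange 1 i 1).foldl
      (fun r k => pvMinO r (pvGet2 dp k j + pvGet2 dp (i - k) j)) none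
    let res := (PySem.List.pyRange 1 j 1).foldl
      (fun r k => pvMinO r (pvGet2 dp i k + pvGet2 dp i (j - k))) res
    -- res = float('inf') (none) is unreachable here: in the loops i ≠ j and i, j ≥ 1
    pvSet2 dp i j (res.getD 0 + 1)

def min_moves_to_cut (a : Int) (b : Int) : Int :=
  let dp0 : List (List Int) := List.replicate (a + 1).toNat (List.replicate (b + 1).toNat 0)
  let dp := (PySem.List.pyRange 1 (a + 1) 1).foldl (fun dp i =>
    (PySem.List.pyRange 1 (b + 1) 1).foldl (fun dp j => pvCellStep dp i j) dp) dp0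
  pvGet2 dp a b

-- ===== PORT B =====
-- memo[i][j] read (None = not computed yet); exact on the in-range indices solve uses
def pvGet2o (mm : List (List (Option Int))) (i j : Int) : Option Int :=
  PySem.List.pyGetD (PySem.List.pyGetD mm i []) j none

-- memo[i][j] = v write; exact on the in-range indices solve uses
def pvSet2o (mm : List (List (Option Int))) (i j : Int) (v : Option Int) :
    List (List (Option Int)) :=
  PySem.List.pySetD mm i (PySem.List.pySetD (PySem.List.pyGetD mm i []) j v)

-- solve(i, j) with the memo table threaded through the two 'for k in range(1, _)' loops
-- (foldl over range); the Nat argument is a fuel guard that only makes the recursion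
-- structural — every call the wrapper makes carries more fuel than it can consume
def solveB : Nat → Int → Int → List (List (Option Int)) → Int × List (List (Option Int))
  | 0, _, _, mm => (0, mm)
  | f + 1, i, j, mm =>
    if i = j then (0, mm)
    else
      match pvGet2o mm i j with
      | some v => (v, mm)
      | none =>
        let st := (PySem.List.pyRange 1 i 1).foldl (fun st k =>
            let p1 := solveB f k j st.2
            let p2 := solveB f (i - k) j p1.2
            let cc := p1.1 + p2.1
            ((match st.1 with
              | none => some cc
              | some b => if cc < b then some cc else some b), p2.2))
          (none, mm)
        let st := (PySem.List.pyRange 1 j 1).foldl (fun st k =>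
            let p1 := solveB f i k st.2
            let p2 := solveB f i (j - k) p1.2
            let cc := p1.1 + p2.1
            ((match st.1 with
              | none => some cc
              | some b => if cc < b then some cc else some b), p2.2))
          st
        -- best = None is unreachable here: i ≠ j and i, j ≥ 1 on every call the wrapper makes
        let v := st.1.getD 0 + 1
        (v, pvSet2o st.2 i j (some v))

def min_moves_to_cut_alt (a : Int) (b : Int) : Int :=
  if a = 0 ∨ b = 0 then 0
  else (solveB (a.toNat + b.toNat + 1) a b
    (List.replicate (a + 1).toNat (List.replicate (b + 1).toNat (none : Option Int)))).1

-- ===== PRECONDITION & SPEC =====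
-- A raises IndexError when a < 0 or b < 0 (dp[a][b] on the empty border rows); excluded.
def Pre_min_moves_to_cut (a : Int) (b : Int) : Prop := 0 ≤ a ∧ 0 ≤ b
instance (a : Int) (b : Int) : Decidable (Pre_min_moves_to_cut a b) := by
  unfold Pre_min_moves_to_cut; infer_instance
def pvWitness_min_moves_to_cut : Int × Int := (2, 3)

def Spec_min_moves_to_cut (a : Int) (b : Int) (out : Int) : Prop := out = min_moves_to_cut_alt a b
instance (a : Int) (b : Int) (out : Int) : Decidable (Spec_min_moves_to_cut a b out) := by
  unfold Spec_min_moves_to_cut; infer_instance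

-- ===== CLAIM (what is proved, stated in full; the proofs are below) =====
def Claim_equal_min_moves_to_cut : Prop := ∀ (a : Int) (b : Int), Dom_min_moves_to_cut a b → Pre_min_moves_to_cut a b → Spec_min_moves_to_cut a b (min_moves_to_cut a b)


-- ===== LEMMAS AND PROOFS =====

def pvMrecF : Nat → Int → Int → Int
  | 0, _, _ => 0
  | f + 1, i, j =>
    if i = j then 0
    else
      let r1 := (PySem.List.pyRange 1 i 1).foldl
        (fun r k => pvMinO r (pvMrecF f k j + pvMrecF f (i - k) j)) none
      let r2 := (PySem.List.pyRange 1 j 1).foldl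
        (fun r k => pvMinO r (pvMrecF f i k + pvMrecF f i (j - k))) r1
      r2.getD 0 + 1

def pvM (i j : Int) : Int := pvMrecF (i.toNat + j.toNat) i j

lemma pvM_self (i : Int) : pvM i i = 0 := by
  unfold pvM
  cases h : i.toNat + i.toNat <;> simp [pvMrecF]

lemma pvMrecF_eq (f : Nat) : ∀ i j : Int, 1 ≤ i → 1 ≤ j → i.toNat + j.toNat ≤ f →
    pvMrecF f i j = pvM i j := by
  induction f using Nat.strong_induction_on with
  | _ f IH =>
    intro i j hi hj hf
    have hs : 2 ≤ i.toNat + j.toNat := by omega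
    obtain ⟨f', rfl⟩ : ∃ f', f = f' + 1 := ⟨f - 1, by omega⟩
    obtain ⟨s', hs'⟩ : ∃ s', i.toNat + j.toNat = s' + 1 := ⟨i.toNat + j.toNat - 1, by omega⟩
    unfold pvM
    rw [hs']
    by_cases hij : i = j
    · simp [pvMrecF, hij]
    · have C1 : ∀ g : Nat, g < f' + 1 → i.toNat + j.toNat ≤ g + 1 →
          (PySem.List.pyRange 1 i 1).foldl
            (fun r k => pvMinO r (pvMrecF g k j + pvMrecF g (i - k) j)) none =
          (PySem.List.pyRange 1 i 1).foldl
            (fun r k => pvMinO r (pvM k j + pvM (i - k) j)) none := by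
        intro g hg hgs
        apply PySem.List.foldl_congr_mem
        intro acc k hk
        rw [PySem.List.mem_pyRange_one] at hk
        rw [IH g hg k j (by omega) hj (by omega),
            IH g hg (i - k) j (by omega) hj (by omega)]
      have C2 : ∀ g : Nat, g < f' + 1 → i.toNat + j.toNat ≤ g + 1 → ∀ init : Option Int,
          (PySem.List.pyRange 1 j 1).foldl
            (fun r k => pvMinO r (pvMrecF g i k + pvMrecF g i (j - k))) init =
          (PySem.List.pyRange 1 j 1).foldl
            (fun r k => pvMinO r (pvM i k + pvM i (j - k))) init := by
        intro g hg hgs init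
        apply PySem.List.foldl_congr_mem
        intro acc k hk
        rw [PySem.List.mem_pyRange_one] at hk
        rw [IH g hg i k hi (by omega) (by omega),
            IH g hg i (j - k) hi (by omega) (by omega)]
      show pvMrecF (f' + 1) i j = pvMrecF (s' + 1) i j
      simp only [pvMrecF, if_neg hij]
      rw [C1 f' (by omega) (by omega), C1 s' (by omega) (by omega),
          C2 f' (by omega) (by omega), C2 s' (by omega) (by omega)]

lemma pvM_ne (i j : Int) (hi : 1 ≤ i) (hj : 1 ≤ j) (hne : i ≠ j) :
    pvM i j =
      ((PySem.List.pyRange 1 j 1).foldl (fun r k => pvMinO r (pvM i k + pvM i (j - k)))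
        ((PySem.List.pyRange 1 i 1).foldl (fun r k => pvMinO r (pvM k j + pvM (i - k) j))
          none)).getD 0 + 1 := by
  obtain ⟨s', hs'⟩ : ∃ s', i.toNat + j.toNat = s' + 1 := ⟨i.toNat + j.toNat - 1, by omega⟩
  have C1 : (PySem.List.pyRange 1 i 1).foldl
        (fun r k => pvMinO r (pvMrecF s' k j + pvMrecF s' (i - k) j)) none =
      (PySem.List.pyRange 1 i 1).foldl
        (fun r k => pvMinO r (pvM k j + pvM (i - k) j)) none := by
    apply PySem.List.foldl_congr_mem
    intro acc k hk
    rw [PySem.List.mem_pyRange_one] at hk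
    rw [pvMrecF_eq s' k j (by omega) hj (by omega),
        pvMrecF_eq s' (i - k) j (by omega) hj (by omega)]
  have C2 : ∀ init : Option Int, (PySem.List.pyRange 1 j 1).foldl
        (fun r k => pvMinO r (pvMrecF s' i k + pvMrecF s' i (j - k))) init =
      (PySem.List.pyRange 1 j 1).foldl
        (fun r k => pvMinO r (pvM i k + pvM i (j - k))) init := by
    intro init
    apply PySem.List.foldl_congr_mem
    intro acc k hk
    rw [PySem.List.mem_pyRange_one] at hk
    rw [pvMrecF_eq s' i k hi (by omega) (by omega),
        pvMrecF_eq s' i (j - k) hi (by omega) (by omega)]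
  conv_lhs => rw [pvM, hs']
  simp only [pvMrecF, if_neg hne]
  rw [C1, C2]

-- generic 2-level list access/update facts, used for A's dp table and B's memo table

lemma pvG2_toNat {α : Type} (dp : List (List α)) (d : α) (x y : Int)
    (hx : 0 ≤ x) (hy : 0 ≤ y) :
    PySem.List.pyGetD (PySem.List.pyGetD dp x []) y d = (dp.getD x.toNat []).getD y.toNat d := by
  have hx' : x = (x.toNat : Int) := (Int.toNat_of_nonneg hx).symm
  have hy' : y = (y.toNat : Int) := (Int.toNat_of_nonneg hy).symm
  conv_lhs => rw [hx', hy', PySem.List.pyGetD_natCast, PySem.List.pyGetD_natCast]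

lemma pvS2_toNat {α : Type} (dp : List (List α)) (x y : Int) (v : α)
    (hx : 0 ≤ x) (hy : 0 ≤ y) :
    PySem.List.pySetD dp x (PySem.List.pySetD (PySem.List.pyGetD dp x []) y v) =
      dp.set x.toNat ((dp.getD x.toNat []).set y.toNat v) := by
  have hx' : x = (x.toNat : Int) := (Int.toNat_of_nonneg hx).symm
  have hy' : y = (y.toNat : Int) := (Int.toNat_of_nonneg hy).symm
  conv_lhs => rw [hx', hy', PySem.List.pyGetD_natCast, PySem.List.pySetD_natCast,
    PySem.List.pySetD_natCast]

lemma getD_set_row {α : Type} (dp : List (List α)) (n : Nat) (r : List α) (x : Nat)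
    (hn : n < dp.length) :
    (dp.set n r).getD x [] = if x = n then r else dp.getD x [] := by
  rw [List.getD_eq_getElem?_getD, List.getD_eq_getElem?_getD, List.getElem?_set]
  by_cases h : x = n
  · simp [h, hn]
  · simp [h, Ne.symm h]

lemma g2_set {α : Type} (dp : List (List α)) (d : α) (x y x' y' : Nat) (v : α)
    (hx : x < dp.length) (hy : y < (dp.getD x []).length) :
    ((dp.set x ((dp.getD x []).set y v)).getD x' []).getD y' d =
      if x' = x ∧ y' = y then v else (dp.getD x' []).getD y' d := by
  rw [getD_set_row dp x _ x' hx]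
  by_cases hxx : x' = x
  · subst hxx
    rw [if_pos rfl, List.getD_eq_getElem?_getD, List.getElem?_set]
    by_cases hyy : y' = y
    · subst hyy
      rw [List.getD_eq_getElem?_getD] at hy
      simp [hy]
    · simp only [if_neg (Ne.symm hyy)]
      rw [← List.getD_eq_getElem?_getD]
      simp [hyy]
  · rw [if_neg hxx]
    simp [hxx]

lemma g2_rep {α : Type} (n m x y : Nat) (z : α) :
    ((List.replicate n (List.replicate m z)).getD x []).getD y z = z := by
  rw [List.getD_eq_getElem?_getD, List.getD_eq_getElem?_getD, List.getElem?_replicate]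
  by_cases h : x < n
  · simp only [h, if_true, Option.getD_some, List.getElem?_replicate]
    by_cases h2 : y < m <;> simp [h2]
  · simp [h]

-- ---------- B side ----------

-- invariant of B's memo table: right shape, and every filled cell holds pvM of its indices
def pvMemoOk (a b : Int) (mm : List (List (Option Int))) : Prop :=
  mm.length = (a + 1).toNat ∧
  (∀ x : Nat, x < mm.length → (mm.getD x []).length = (b + 1).toNat) ∧
  ∀ (x y : Nat) (v : Int), (mm.getD x []).getD y none = some v → v = pvM (x : Int) (y : Int)

lemma pvMinO_match (r : Option Int) (cc : Int) :
    (match r with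
      | none => some cc
      | some b => if cc < b then some cc else some b) = pvMinO r cc := by
  cases r with
  | none => rfl
  | some x =>
    simp only [pvMinO, Int.min_def]
    split_ifs <;> (first | rfl | omega)

lemma memo_write (a b i j : Int) (mm : List (List (Option Int))) (v : Int)
    (hi : 1 ≤ i) (hia : i ≤ a) (hj : 1 ≤ j) (hjb : j ≤ b)
    (hok : pvMemoOk a b mm) (hv : v = pvM i j) :
    pvMemoOk a b (pvSet2o mm i j (some v)) := by
  obtain ⟨hsh1, hsh2, hsh3⟩ := hok
  have hxi : i.toNat < mm.length := by rw [hsh1]; omega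
  have hyj : j.toNat < (mm.getD i.toNat []).length := by rw [hsh2 i.toNat hxi]; omega
  rw [pvSet2o, pvS2_toNat mm i j _ (by omega) (by omega)]
  refine ⟨?_, ?_, ?_⟩
  · rw [List.length_set, hsh1]
  · intro x hx
    rw [List.length_set] at hx
    rw [getD_set_row mm i.toNat _ x hxi]
    by_cases h : x = i.toNat
    · rw [if_pos h, List.length_set]
      exact hsh2 i.toNat hxi
    · rw [if_neg h]
      exact hsh2 x hx
  · intro x y w hw
    rw [g2_set mm none i.toNat j.toNat x y _ hxi hyj] at hw
    by_cases hxy : x = i.toNat ∧ y = j.toNat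
    · rw [if_pos hxy] at hw
      have hw' := (Option.some_injective _ hw).symm
      rw [hw', hv, hxy.1, hxy.2,
        Int.toNat_of_nonneg (by omega : (0:Int) ≤ i),
        Int.toNat_of_nonneg (by omega : (0:Int) ≤ j)]
    · rw [if_neg hxy] at hw
      exact hsh3 x y w hw

lemma solveB_spec (a b : Int) (f : Nat) :
    ∀ (i j : Int) (mm : List (List (Option Int))),
    i.toNat + j.toNat < f → 1 ≤ i → i ≤ a → 1 ≤ j → j ≤ b → pvMemoOk a b mm →
    (solveB f i j mm).1 = pvM i j ∧ pvMemoOk a b (solveB f i j mm).2 := by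
  induction f using Nat.strong_induction_on with
  | _ f IH =>
    intro i j mm hf hi hia hj hjb hm
    obtain ⟨f', rfl⟩ : ∃ f', f = f' + 1 := ⟨f - 1, by omega⟩
    rw [solveB]
    by_cases hij : i = j
    · rw [if_pos hij]
      exact ⟨(pvM_self i).symm.trans (by rw [hij]), hm⟩
    · rw [if_neg hij]
      cases hget : pvGet2o mm i j with
      | some v =>
        refine ⟨?_, hm⟩
        rw [pvGet2o, pvG2_toNat mm none i j (by omega) (by omega)] at hget
        have := hm.2.2 i.toNat j.toNat v hget
        rwa [Int.toNat_of_nonneg (by omega), Int.toNat_of_nonneg (by omega)] at this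
      | none =>
        dsimp only
        simp only [pvMinO_match]
        have L1 : ∀ (l : List Int) (st : Option Int × List (List (Option Int))),
            (∀ k ∈ l, 1 ≤ k ∧ k < i) → pvMemoOk a b st.2 →
            (l.foldl (fun st k =>
                (pvMinO st.1 ((solveB f' k j st.2).1 +
                    (solveB f' (i - k) j (solveB f' k j st.2).2).1),
                  (solveB f' (i - k) j (solveB f' k j st.2).2).2)) st).1 =
              l.foldl (fun r k => pvMinO r (pvM k j + pvM (i - k) j)) st.1
            ∧ pvMemoOk a b (l.foldl (fun st k =>
                (pvMinO st.1 ((solveB f' k j st.2).1 +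
                    (solveB f' (i - k) j (solveB f' k j st.2).2).1),
                  (solveB f' (i - k) j (solveB f' k j st.2).2).2)) st).2 := by
          intro l
          induction l with
          | nil => intro st _ hst; exact ⟨rfl, hst⟩
          | cons k l IHl =>
            intro st hmem hst
            obtain ⟨hk1, hki⟩ := hmem k List.mem_cons_self
            obtain ⟨h1, hm1⟩ := IH f' (by omega) k j st.2 (by omega) hk1 (by omega) hj hjb hst
            obtain ⟨h2, hm2⟩ := IH f' (by omega) (i - k) j _ (by omega) (by omega) (by omega)
              hj hjb hm1
            simp only [List.foldl_cons, h1, h2]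
            exact IHl (pvMinO st.1 (pvM k j + pvM (i - k) j),
                (solveB f' (i - k) j (solveB f' k j st.2).2).2)
              (fun k' hk' => hmem k' (List.mem_cons_of_mem _ hk')) hm2
        have L2 : ∀ (l : List Int) (st : Option Int × List (List (Option Int))),
            (∀ k ∈ l, 1 ≤ k ∧ k < j) → pvMemoOk a b st.2 →
            (l.foldl (fun st k =>
                (pvMinO st.1 ((solveB f' i k st.2).1 +
                    (solveB f' i (j - k) (solveB f' i k st.2).2).1),
                  (solveB f' i (j - k) (solveB f' i k st.2).2).2)) st).1 =
              l.foldl (fun r k => pvMinO r (pvM i k + pvM i (j - k))) st.1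
            ∧ pvMemoOk a b (l.foldl (fun st k =>
                (pvMinO st.1 ((solveB f' i k st.2).1 +
                    (solveB f' i (j - k) (solveB f' i k st.2).2).1),
                  (solveB f' i (j - k) (solveB f' i k st.2).2).2)) st).2 := by
          intro l
          induction l with
          | nil => intro st _ hst; exact ⟨rfl, hst⟩
          | cons k l IHl =>
            intro st hmem hst
            obtain ⟨hk1, hkj⟩ := hmem k List.mem_cons_self
            obtain ⟨h1, hm1⟩ := IH f' (by omega) i k st.2 (by omega) hi hia hk1 (by omega) hst
            obtain ⟨h2, hm2⟩ := IH f' (by omega) i (j - k) _ (by omega) hi hia (by omega)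
              (by omega) hm1
            simp only [List.foldl_cons, h1, h2]
            exact IHl (pvMinO st.1 (pvM i k + pvM i (j - k)),
                (solveB f' i (j - k) (solveB f' i k st.2).2).2)
              (fun k' hk' => hmem k' (List.mem_cons_of_mem _ hk')) hm2
        obtain ⟨l1, lm1⟩ := L1 (PySem.List.pyRange 1 i 1) (none, mm)
          (fun k hk => by rw [PySem.List.mem_pyRange_one] at hk; omega) hm
        obtain ⟨l2, lm2⟩ := L2 (PySem.List.pyRange 1 j 1) _
          (fun k hk => by rw [PySem.List.mem_pyRange_one] at hk; omega) lm1
        have hval : ((PySem.List.pyRange 1 j 1).foldl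
              (fun st k =>
                (pvMinO st.1 ((solveB f' i k st.2).1 +
                    (solveB f' i (j - k) (solveB f' i k st.2).2).1),
                  (solveB f' i (j - k) (solveB f' i k st.2).2).2))
              ((PySem.List.pyRange 1 i 1).foldl
                (fun st k =>
                  (pvMinO st.1 ((solveB f' k j st.2).1 +
                      (solveB f' (i - k) j (solveB f' k j st.2).2).1),
                    (solveB f' (i - k) j (solveB f' k j st.2).2).2)) (none, mm))).1.getD 0 + 1
            = pvM i j := by
          rw [l2, l1, ← pvM_ne i j hi hj hij]
        exact ⟨hval, memo_write a b i j _ _ hi hia hj hjb lm2 hval⟩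

lemma B_eq (a b : Int) (ha : 1 ≤ a) (hb : 1 ≤ b) : min_moves_to_cut_alt a b = pvM a b := by
  have hok : pvMemoOk a b
      (List.replicate (a + 1).toNat (List.replicate (b + 1).toNat (none : Option Int))) := by
    refine ⟨List.length_replicate, ?_, ?_⟩
    · intro x hx
      rw [List.length_replicate] at hx
      rw [List.getD_eq_getElem?_getD, List.getElem?_replicate, if_pos hx, Option.getD_some,
        List.length_replicate]
    · intro x y v hv
      rw [g2_rep] at hv
      exact absurd hv (by simp)
  have := solveB_spec a b (a.toNat + b.toNat + 1) a b _ (by omega) ha le_rfl hb le_rfl hok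
  rw [min_moves_to_cut_alt, if_neg (by omega)]
  exact this.1

-- ---------- A side ----------

def pvShape (a b : Int) (dp : List (List Int)) : Prop :=
  dp.length = (a + 1).toNat ∧ ∀ x : Nat, x < dp.length → (dp.getD x []).length = (b + 1).toNat

def pvInv (a b : Int) (dp : List (List Int)) (i j : Int) : Prop :=
  ∀ x y : Int, 1 ≤ x → x ≤ a → 1 ≤ y → y ≤ b →
    pvGet2 dp x y = if x < i ∨ (x = i ∧ y < j) then pvM x y else 0

lemma pvGet2_toNat (dp : List (List Int)) (x y : Int) (hx : 0 ≤ x) (hy : 0 ≤ y) :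
    pvGet2 dp x y = ((dp.getD x.toNat []).getD y.toNat 0) := by
  unfold pvGet2
  exact pvG2_toNat dp 0 x y hx hy

lemma pvSet2_toNat (dp : List (List Int)) (x y v : Int) (hx : 0 ≤ x) (hy : 0 ≤ y) :
    pvSet2 dp x y v = dp.set x.toNat ((dp.getD x.toNat []).set y.toNat v) := by
  unfold pvSet2
  exact pvS2_toNat dp x y v hx hy

lemma pvGet2_rep (n m : Nat) (x y : Int) (hx : 0 ≤ x) (hy : 0 ≤ y) :
    pvGet2 (List.replicate n (List.replicate m (0 : Int))) x y = 0 := by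
  rw [pvGet2_toNat _ _ _ hx hy]
  exact g2_rep n m x.toNat y.toNat 0

lemma cellStep_spec (a b : Int) (dp : List (List Int)) (i j : Int)
    (hi1 : 1 ≤ i) (hia : i ≤ a) (hj1 : 1 ≤ j) (hjb : j ≤ b)
    (hs : pvShape a b dp) (hinv : pvInv a b dp i j) :
    pvShape a b (pvCellStep dp i j) ∧ pvInv a b (pvCellStep dp i j) i (j + 1) := by
  obtain ⟨hs1, hs2⟩ := hs
  have hxi : i.toNat < dp.length := by rw [hs1]; omega
  have hyj : j.toNat < (dp.getD i.toNat []).length := by rw [hs2 i.toNat hxi]; omega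
  suffices H : ∀ w, w = pvM i j →
      pvShape a b (pvSet2 dp i j w) ∧ pvInv a b (pvSet2 dp i j w) i (j + 1) by
    unfold pvCellStep
    by_cases hij : i = j
    · rw [if_pos hij]
      exact H 0 (by rw [hij, pvM_self])
    · rw [if_neg hij]
      apply H
      have R1 : (PySem.List.pyRange 1 i 1).foldl
            (fun r k => pvMinO r (pvGet2 dp k j + pvGet2 dp (i - k) j)) none =
          (PySem.List.pyRange 1 i 1).foldl
            (fun r k => pvMinO r (pvM k j + pvM (i - k) j)) none := by
        apply PySem.List.foldl_congr_mem
        intro acc k hk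
        rw [PySem.List.mem_pyRange_one] at hk
        rw [hinv k j (by omega) (by omega) hj1 hjb, if_pos (by omega),
            hinv (i - k) j (by omega) (by omega) hj1 hjb, if_pos (by omega)]
      have R2 : ∀ init : Option Int, (PySem.List.pyRange 1 j 1).foldl
            (fun r k => pvMinO r (pvGet2 dp i k + pvGet2 dp i (j - k))) init =
          (PySem.List.pyRange 1 j 1).foldl
            (fun r k => pvMinO r (pvM i k + pvM i (j - k))) init := by
        intro init
        apply PySem.List.foldl_congr_mem
        intro acc k hk
        rw [PySem.List.mem_pyRange_one] at hk
        rw [hinv i k (by omega) (by omega) (by omega) (by omega), if_pos (by omega),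
            hinv i (j - k) (by omega) (by omega) (by omega) (by omega), if_pos (by omega)]
      rw [R1, R2, ← pvM_ne i j hi1 hj1 hij]
  intro w hw
  rw [pvSet2_toNat dp i j w (by omega) (by omega)]
  constructor
  · constructor
    · rw [List.length_set, hs1]
    · intro x hx
      rw [List.length_set] at hx
      rw [getD_set_row dp i.toNat _ x hxi]
      by_cases h : x = i.toNat
      · rw [if_pos h, List.length_set]
        exact hs2 i.toNat hxi
      · rw [if_neg h]
        exact hs2 x hx
  · intro x y hx1 hxa hy1 hyb
    rw [pvGet2_toNat _ _ _ (by omega) (by omega),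
        g2_set dp 0 i.toNat j.toNat x.toNat y.toNat w hxi hyj]
    by_cases hxy : x = i ∧ y = j
    · rw [if_pos (by omega), if_pos (by right; exact ⟨hxy.1, by omega⟩)]
      rw [hw, hxy.1, hxy.2]
    · rw [if_neg (by omega), ← pvGet2_toNat _ _ _ (by omega) (by omega),
          hinv x y hx1 hxa hy1 hyb]
      exact if_congr (by omega) rfl rfl

lemma rowLoop (a b i : Int) (hi1 : 1 ≤ i) (hia : i ≤ a) :
    ∀ (n : Nat) (j : Int) (dp : List (List Int)), 1 ≤ j → j ≤ b + 1 → (b + 1 - j).toNat ≤ n →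
      pvShape a b dp → pvInv a b dp i j →
      pvShape a b ((PySem.List.pyRange j (b + 1) 1).foldl (fun dp j => pvCellStep dp i j) dp)
      ∧ pvInv a b ((PySem.List.pyRange j (b + 1) 1).foldl (fun dp j => pvCellStep dp i j) dp)
          i (b + 1) := by
  intro n
  induction n with
  | zero =>
    intro j dp hj1 hjb hn hs hinv
    have hj : j = b + 1 := by omega
    subst hj
    rw [PySem.List.pyRange_one_eq_nil (by omega)]
    exact ⟨hs, hinv⟩
  | succ n IHn =>
    intro j dp hj1 hjb hn hs hinv
    by_cases hlt : j < b + 1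
    · rw [PySem.List.pyRange_one_cons hlt, List.foldl_cons]
      obtain ⟨hs', hinv'⟩ := cellStep_spec a b dp i j hi1 hia hj1 (by omega) hs hinv
      exact IHn (j + 1) (pvCellStep dp i j) (by omega) (by omega) (by omega) hs' hinv'
    · have hj : j = b + 1 := by omega
      subst hj
      rw [PySem.List.pyRange_one_eq_nil (by omega)]
      exact ⟨hs, hinv⟩

lemma inv_shift (a b : Int) (dp : List (List Int)) (i : Int)
    (h : pvInv a b dp i (b + 1)) : pvInv a b dp (i + 1) 1 := by
  intro x y hx1 hxa hy1 hyb
  rw [h x y hx1 hxa hy1 hyb]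
  exact if_congr (by omega) rfl rfl

lemma colLoop (a b : Int) (hb : 1 ≤ b) :
    ∀ (n : Nat) (i : Int) (dp : List (List Int)), 1 ≤ i → i ≤ a + 1 → (a + 1 - i).toNat ≤ n →
      pvShape a b dp → pvInv a b dp i 1 →
      pvInv a b ((PySem.List.pyRange i (a + 1) 1).foldl (fun dp i =>
          (PySem.List.pyRange 1 (b + 1) 1).foldl (fun dp j => pvCellStep dp i j) dp) dp)
        (a + 1) 1 := by
  intro n
  induction n with
  | zero =>
    intro i dp hi1 hia hn hs hinv
    have hi : i = a + 1 := by omega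
    subst hi
    rw [PySem.List.pyRange_one_eq_nil (le_refl (a + 1))]
    exact hinv
  | succ n IHn =>
    intro i dp hi1 hia hn hs hinv
    by_cases hlt : i < a + 1
    · rw [PySem.List.pyRange_one_cons hlt, List.foldl_cons]
      obtain ⟨hs', hinv'⟩ := rowLoop a b i hi1 (by omega) (b.toNat) 1 dp (by omega)
        (by omega) (by omega) hs hinv
      exact IHn (i + 1) _ (by omega) (by omega) (by omega) hs' (inv_shift a b _ i hinv')
    · have hi : i = a + 1 := by omega
      subst hi
      rw [PySem.List.pyRange_one_eq_nil (le_refl (a + 1))]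
      exact hinv

lemma shape0 (a b : Int) :
    pvShape a b (List.replicate (a + 1).toNat (List.replicate (b + 1).toNat (0 : Int))) := by
  constructor
  · rw [List.length_replicate]
  · intro x hx
    rw [List.length_replicate] at hx
    rw [List.getD_eq_getElem?_getD, List.getElem?_replicate, if_pos hx, Option.getD_some,
        List.length_replicate]

lemma inv0 (a b : Int) :
    pvInv a b (List.replicate (a + 1).toNat (List.replicate (b + 1).toNat (0 : Int))) 1 1 := by
  intro x y hx1 hxa hy1 hyb
  rw [pvGet2_rep _ _ x y (by omega) (by omega), if_neg (by omega)]

lemma A_eq (a b : Int) (ha : 1 ≤ a) (hb : 1 ≤ b) : min_moves_to_cut a b = pvM a b := by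
  simp only [min_moves_to_cut]
  have := colLoop a b hb a.toNat 1
    (List.replicate (a + 1).toNat (List.replicate (b + 1).toNat (0 : Int)))
    (by omega) (by omega) (by omega) (shape0 a b) (inv0 a b)
  rw [this a b ha le_rfl hb le_rfl, if_pos (by omega)]

lemma A_zero (a b : Int) (ha : 0 ≤ a) (hb : 0 ≤ b) (h : a = 0 ∨ b = 0) :
    min_moves_to_cut a b = 0 := by
  simp only [min_moves_to_cut]
  rcases h with h | h
  · subst h
    rw [show PySem.List.pyRange 1 ((0 : Int) + 1) 1 = [] from
        PySem.List.pyRange_one_eq_nil (by omega), List.foldl_nil]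
    exact pvGet2_rep _ _ 0 b (by omega) hb
  · subst h
    rw [show PySem.List.pyRange 1 ((0 : Int) + 1) 1 = [] from
        PySem.List.pyRange_one_eq_nil (by omega)]
    simp only [List.foldl_nil]
    rw [List.foldl_fixed]
    exact pvGet2_rep _ _ a 0 ha (by omega)

-- ===== VERDICT (by name: the statement is the Claim_ definition above) =====
theorem min_moves_to_cut_spec : Claim_equal_min_moves_to_cut := by
  intro a b _ hpre
  unfold Spec_min_moves_to_cut
  obtain ⟨ha, hb⟩ := hpre
  by_cases h0 : a = 0 ∨ b = 0
  · rw [A_zero a b ha hb h0]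
    simp [min_moves_to_cut_alt, h0]
  · have ha1 : 1 ≤ a := by omega
    have hb1 : 1 ≤ b := by omega
    rw [A_eq a b ha1 hb1, B_eq a b ha1 hb1]
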